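-- pv_equiv track=rewrite | github.com/MarijaT7/Samoobucavajuci-i-adaptivni-algoritmi | Tic-Tac-Toe/ttt.py | whos_turn
-- ===== SOURCE A (Python) =====
-- def whos_turn(board):
--     cc = 0
--     for row in board:
--         for spot in row:
--             if(spot == "X"):
--                 cc = cc + 1
--             if(spot == "O"):
--                 cc = cc - 1
--
--     return cc
-- ===== SOURCE B (Python) =====
-- _VALUE = {"X": 1, "O": -1}
--
-- def whos_turn(board):
--     def go(rows):
--         if not rows:
--             return 0
--         head, *rest = rows
--         return sum(map(lambda spot: _VALUE.get(spot, 0), head)) + go(rest)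
--     return go(board)
-- ===== Notes on version B (the rewrite author's own statement) =====
-- stated objective: alternative
-- what changed: Replaces the fused iterative accumulator with +1/-1 branch tests by a table-driven recursion: each cell is mapped through a value dictionary {'X':1,'O':-1} (default 0), rows are summed with map/sum, and the board is consumed by structural recursion instead of a loop.
import Mathlib
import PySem

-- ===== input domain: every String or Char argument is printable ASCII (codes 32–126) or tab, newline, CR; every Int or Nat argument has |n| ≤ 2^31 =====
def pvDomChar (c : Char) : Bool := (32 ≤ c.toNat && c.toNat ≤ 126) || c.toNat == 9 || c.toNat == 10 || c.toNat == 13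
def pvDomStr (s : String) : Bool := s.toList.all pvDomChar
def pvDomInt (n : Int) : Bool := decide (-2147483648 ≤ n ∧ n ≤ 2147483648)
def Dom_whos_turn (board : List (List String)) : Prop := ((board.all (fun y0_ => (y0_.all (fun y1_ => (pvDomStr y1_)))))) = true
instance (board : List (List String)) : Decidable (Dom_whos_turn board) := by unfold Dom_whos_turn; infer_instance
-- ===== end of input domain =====

-- B replaces A's fused accumulating loop by a table-driven structural recursion
-- (value dictionary per cell, map/sum per row); objective: alternative decomposition.


-- ===== PORT A =====
def whos_turn (board : List (List String)) : Int :=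
  board.foldl (fun cc row =>
    row.foldl (fun cc spot =>
      let cc := if spot == "X" then cc + 1 else cc
      if spot == "O" then cc - 1 else cc) cc) 0

-- ===== PORT B =====
-- _VALUE = {"X": 1, "O": -1}
def pvValue : PySem.Dict String Int := PySem.Dict.ofList [("X", 1), ("O", -1)]

-- def go(rows): recursion over the rows; per row sum(map(lambda spot: _VALUE.get(spot,0), head))
def pvGo : List (List String) → Int
  | [] => 0
  | head :: rest => (head.map (fun spot => PySem.Dict.getD pvValue spot 0)).sum + pvGo rest

def whos_turn_alt (board : List (List String)) : Int := pvGo board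

-- ===== PRECONDITION & SPEC =====
def Spec_whos_turn (board : List (List String)) (out : Int) : Prop := out = whos_turn_alt board
instance (board : List (List String)) (out : Int) : Decidable (Spec_whos_turn board out) := by unfold Spec_whos_turn; infer_instance

-- ===== CLAIM (what is proved, stated in full; the proofs are below) =====
def Claim_equal_whos_turn : Prop := ∀ (board : List (List String)), Dom_whos_turn board → Spec_whos_turn board (whos_turn board)

-- ===== LEMMAS AND PROOFS =====

lemma pvCell_eq (spot : String) :
    PySem.Dict.getD pvValue spot 0
      = (if spot == "X" then (1:Int) else 0) + (if spot == "O" then -1 else 0) := by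
  by_cases hx : spot = "X"
  · subst hx; decide
  by_cases ho : spot = "O"
  · subst ho; decide
  have hx' : ("X" == spot) = false := by simp [Ne.symm hx]
  have ho' : ("O" == spot) = false := by simp [Ne.symm ho]
  simp [pvValue, PySem.Dict.getD, PySem.Dict.get?, PySem.Dict.ofList, PySem.Dict.empty,
    PySem.Dict.update, PySem.Dict.insert, List.find?, hx, ho, hx', ho']

lemma row_foldl (row : List String) (cc : Int) :
    row.foldl (fun cc spot =>
      let cc := if spot == "X" then cc + 1 else cc
      if spot == "O" then cc - 1 else cc) cc
    = cc + (row.map (fun spot => PySem.Dict.getD pvValue spot 0)).sum := by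
  induction row generalizing cc with
  | nil => simp
  | cons x xs ih =>
    simp only [List.foldl_cons, List.map_cons, List.sum_cons, ih, pvCell_eq]
    by_cases hx : x = "X" <;> by_cases ho : x = "O" <;> simp_all <;> ring

lemma board_foldl (board : List (List String)) (cc : Int) :
    board.foldl (fun cc row =>
      row.foldl (fun cc spot =>
        let cc := if spot == "X" then cc + 1 else cc
        if spot == "O" then cc - 1 else cc) cc) cc
    = cc + pvGo board := by
  induction board generalizing cc with
  | nil => simp [pvGo]
  | cons r rs ih =>
    rw [List.foldl_cons, row_foldl, ih, pvGo]
    ring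

-- ===== VERDICT =====
theorem whos_turn_spec : Claim_equal_whos_turn := by
  intro board _
  unfold Spec_whos_turn whos_turn whos_turn_alt
  rw [board_foldl]
  ring
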